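-- pv_equiv track=rewrite | github.com/RafalSzyinski1/SPD | lab5/main.py | is_valid_pi
-- ===== SOURCE A (Python) =====
-- def is_valid_pi(pi):
--
--     for m_pi in pi:
--         tasks = {}
--         for tp in m_pi:
--             if tp[0] not in tasks:
--                 tasks[tp[0]] = tp[1]
--             else:
--                 if tp[1] <= tasks[tp[0]]:
--                     return False
--                 else:
--                     tasks[tp[0]] = tp[1]
--     return True
-- ===== SOURCE B (Python) =====
-- def _groups(m_pi):
--     g = {}
--     for k, v in m_pi:
--         g.setdefault(k, []).append(v)
--     return g
--
--
-- def is_valid_pi(pi):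
--     for m_pi in pi:
--         for vals in _groups(m_pi).values():
--             if any(a >= b for a, b in zip(vals, vals[1:])):
--                 return False
--     return True
-- ===== Notes on version B (the rewrite author's own statement) =====
-- stated objective: alternative
-- what changed: Instead of tracking only the last value per key and deciding validity inline during the scan, B first groups each machine's values into a per-key list (setdefault/append) and then, in a separate pass, rejects any grouped list that is not strictly increasing over consecutive pairs.
import Mathlib
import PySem

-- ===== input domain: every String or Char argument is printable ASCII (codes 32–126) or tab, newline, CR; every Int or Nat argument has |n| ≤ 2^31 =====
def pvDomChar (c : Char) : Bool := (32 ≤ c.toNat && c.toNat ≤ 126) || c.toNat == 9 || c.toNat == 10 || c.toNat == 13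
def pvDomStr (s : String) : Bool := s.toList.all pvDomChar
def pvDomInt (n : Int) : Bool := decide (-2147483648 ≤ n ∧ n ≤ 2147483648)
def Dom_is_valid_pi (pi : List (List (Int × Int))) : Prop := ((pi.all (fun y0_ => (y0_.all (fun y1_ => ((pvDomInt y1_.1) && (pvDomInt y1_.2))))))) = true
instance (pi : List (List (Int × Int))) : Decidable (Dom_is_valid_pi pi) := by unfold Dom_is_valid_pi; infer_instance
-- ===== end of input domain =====

-- B changes the algorithm's decomposition: A validates inline while scanning, keeping only the last
-- value per key; B builds full per-key value lists first, then checks each list is strictly increasing.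

-- ===== PORT A =====
-- inner 'for tp in m_pi' loop of A, with the tasks dict and the early 'return False'
def pvCheckMachine : List (Int × Int) → PySem.Dict Int Int → Bool
  | [], _ => true
  | tp :: rest, tasks =>
    match tasks.get? tp.1 with
    | none => pvCheckMachine rest (tasks.insert tp.1 tp.2)
    | some w => if tp.2 ≤ w then false else pvCheckMachine rest (tasks.insert tp.1 tp.2)

def is_valid_pi : List (List (Int × Int)) → Bool
  | [] => true
  | m :: ms => if pvCheckMachine m PySem.Dict.empty then is_valid_pi ms else false

-- ===== PORT B =====
-- B's _groups: g.setdefault(k, []).append(v)  ==  g[k] = g.get(k, []) + [v]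
def pvGroups (m : List (Int × Int)) : PySem.Dict Int (List Int) :=
  m.foldl (fun d p => d.modify p.1 [] (· ++ [p.2])) PySem.Dict.empty

def is_valid_pi_alt (pi : List (List (Int × Int))) : Bool :=
  pi.all (fun m =>
    (pvGroups m).values.all (fun vals =>
      !((vals.zip (PySem.List.slice vals (some 1) none)).any (fun p => p.1 ≥ p.2))))

-- ===== PRECONDITION & SPEC =====
def Spec_is_valid_pi (pi : List (List (Int × Int))) (out : Bool) : Prop := out = is_valid_pi_alt pi
instance (pi : List (List (Int × Int))) (out : Bool) : Decidable (Spec_is_valid_pi pi out) := by unfold Spec_is_valid_pi; infer_instance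

-- ===== CLAIM (what is proved, stated in full; the proofs are below) =====
def Claim_equal_is_valid_pi : Prop := ∀ (pi : List (List (Int × Int))), Dom_is_valid_pi pi → Spec_is_valid_pi pi (is_valid_pi pi)

-- ===== LEMMAS AND PROOFS =====

-- B's per-key list for key k: the values of m whose key is k, in order
def pvOcc (k : Int) (m : List (Int × Int)) : List Int := (m.filter (fun p => p.1 == k)).map (·.2)

-- strictly-increasing test of B, on the plain list
def pvSI (l : List Int) : Bool := !((l.zip l.tail).any (fun p => p.1 ≥ p.2))

-- A's inner loop with the dict abstracted to a lookup function
def pvChk : List (Int × Int) → (Int → Option Int) → Bool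
  | [], _ => true
  | tp :: rest, f =>
    match f tp.1 with
    | none => pvChk rest (fun k' => if k' = tp.1 then some tp.2 else f k')
    | some w => if tp.2 ≤ w then false else pvChk rest (fun k' => if k' = tp.1 then some tp.2 else f k')

-- strict increase of l continued from an optional previous value
def pvGood : Option Int → List Int → Bool
  | _, [] => true
  | none, v :: vs => pvGood (some v) vs
  | some w, v :: vs => decide (w < v) && pvGood (some v) vs

theorem pvCheckMachine_eq_chk (m : List (Int × Int)) (d : PySem.Dict Int Int) :
    pvCheckMachine m d = pvChk m (fun k => d.get? k) := by
  induction m generalizing d with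
  | nil => rfl
  | cons tp rest ih =>
    simp only [pvCheckMachine, pvChk]
    have hf : (fun k => (d.insert tp.1 tp.2).get? k)
        = (fun k' => if k' = tp.1 then some tp.2 else d.get? k') := by
      funext k'; simp [PySem.Dict.get?_insert]
    cases d.get? tp.1 with
    | none => rw [ih, hf]
    | some w => by_cases h : tp.2 ≤ w <;> simp [h, ih, hf]

theorem pvGood_some_eq_SI (l : List Int) (w : Int) : pvGood (some w) l = pvSI (w :: l) := by
  induction l generalizing w with
  | nil => rfl
  | cons v vs ih =>
    simp only [pvGood, ih, pvSI, List.tail_cons, List.zip_cons_cons, List.any_cons,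
      Bool.not_or]
    congr 1
    rw [← decide_not]
    simp [not_le]

theorem pvGood_none_eq_SI (l : List Int) : pvGood none l = pvSI l := by
  cases l with
  | nil => rfl
  | cons v vs => simpa [pvGood, pvSI] using pvGood_some_eq_SI vs v

theorem pvOcc_cons (k : Int) (tp : Int × Int) (rest : List (Int × Int)) :
    pvOcc k (tp :: rest) = if tp.1 = k then tp.2 :: pvOcc k rest else pvOcc k rest := by
  by_cases h : tp.1 = k <;> simp [pvOcc, h]

theorem pvChk_iff (m : List (Int × Int)) (f : Int → Option Int) :
    pvChk m f = true ↔ ∀ k, pvGood (f k) (pvOcc k m) = true := by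
  induction m generalizing f with
  | nil =>
    simp only [pvChk, true_iff]
    intro k; simp [pvOcc, pvGood]
  | cons tp rest ih =>
    have hocc : ∀ k, pvOcc k (tp :: rest)
        = if tp.1 = k then tp.2 :: pvOcc k rest else pvOcc k rest := fun k => pvOcc_cons k tp rest
    simp only [pvChk]
    cases hfk : f tp.1 with
    | none =>
      dsimp only
      rw [ih]
      constructor
      · intro h k
        rw [hocc k]
        by_cases hk : tp.1 = k
        · subst hk; rw [if_pos rfl, hfk]
          simpa [pvGood] using h tp.1
        · rw [if_neg hk]
          have := h k
          rwa [if_neg (fun he => hk he.symm)] at this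
      · intro h k
        by_cases hk : k = tp.1
        · subst hk; rw [if_pos rfl]
          have := h tp.1; rw [hocc tp.1, if_pos rfl, hfk] at this
          simpa [pvGood] using this
        · rw [if_neg hk]
          have := h k; rwa [hocc k, if_neg (fun he => hk he.symm)] at this
    | some w =>
      dsimp only
      by_cases hle : tp.2 ≤ w
      · rw [if_pos hle]
        simp only [Bool.false_eq_true, false_iff, not_forall]
        refine ⟨tp.1, ?_⟩
        rw [hocc tp.1, if_pos rfl, hfk]
        simp [pvGood, not_lt.mpr hle]
      · rw [if_neg hle, ih]
        constructor
        · intro h k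
          rw [hocc k]
          by_cases hk : tp.1 = k
          · subst hk; rw [if_pos rfl, hfk]
            have := h tp.1; rw [if_pos rfl] at this
            simp [pvGood, this, lt_of_not_ge hle]
          · rw [if_neg hk]
            have := h k
            rwa [if_neg (fun he => hk he.symm)] at this
        · intro h k
          by_cases hk : k = tp.1
          · subst hk; rw [if_pos rfl]
            have := h tp.1; rw [hocc tp.1, if_pos rfl, hfk] at this
            simp only [pvGood, Bool.and_eq_true] at this
            exact this.2
          · rw [if_neg hk]
            have := h k; rwa [hocc k, if_neg (fun he => hk he.symm)] at this

theorem pvGroups_getD (m : List (Int × Int)) (k : Int) :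
    (pvGroups m).getD k [] = pvOcc k m := by
  unfold pvGroups pvOcc
  rw [PySem.Dict.getD_foldl_modify_append]
  simp

theorem pvGroups_keys_nodup (m : List (Int × Int)) : (pvGroups m).keys.Nodup := by
  unfold pvGroups
  exact PySem.Dict.nodup_keys_foldl_modify_key m Prod.fst [] (fun _ p => (· ++ [p.2]))
    PySem.Dict.empty (by simp)

theorem pvOcc_of_not_mem (m : List (Int × Int)) (k : Int) (h : k ∉ m.map Prod.fst) :
    pvOcc k m = [] := by
  unfold pvOcc
  rw [List.filter_eq_nil_iff.mpr, List.map_nil]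
  intro p hp hbeq
  exact h (List.mem_map.mpr ⟨p, hp, by simpa using hbeq⟩)

theorem pvMachineB_iff (m : List (Int × Int)) :
    ((pvGroups m).values.all pvSI = true) ↔ ∀ k, pvSI (pvOcc k m) = true := by
  have hnd := pvGroups_keys_nodup m
  rw [PySem.Dict.values_eq_map_keys (pvGroups m) hnd []]
  simp only [List.all_map, List.all_eq_true, Function.comp]
  constructor
  · intro h k
    by_cases hk : k ∈ (pvGroups m).keys
    · have := h k hk
      rwa [pvGroups_getD] at this
    · have hnm : k ∉ m.map Prod.fst := by
        intro hmem
        apply hk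
        unfold pvGroups
        rw [PySem.Dict.keys_foldl_modify_key]
        exact (PySem.Set.mem_update _ _ _).mpr (Or.inr hmem)
      rw [pvOcc_of_not_mem m k hnm]; rfl
  · intro h k _
    rw [pvGroups_getD]; exact h k

theorem pvSI_alt_form (vals : List Int) :
    (!((vals.zip (PySem.List.slice vals (some 1) none)).any (fun p => p.1 ≥ p.2))) = pvSI vals := by
  rw [PySem.List.slice_from_one]; rfl

theorem pvMachine_eq (m : List (Int × Int)) :
    pvCheckMachine m PySem.Dict.empty
      = (pvGroups m).values.all (fun vals =>
          !((vals.zip (PySem.List.slice vals (some 1) none)).any (fun p => p.1 ≥ p.2))) := by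
  have hB : (pvGroups m).values.all (fun vals =>
      !((vals.zip (PySem.List.slice vals (some 1) none)).any (fun p => p.1 ≥ p.2)))
      = (pvGroups m).values.all pvSI := by
    congr 1; funext vals; exact pvSI_alt_form vals
  rw [hB]
  have hA : pvCheckMachine m PySem.Dict.empty = pvChk m (fun _ => none) := by
    have he : (fun k => (PySem.Dict.empty : PySem.Dict Int Int).get? k)
        = (fun _ : Int => (none : Option Int)) := by funext k; simp
    rw [pvCheckMachine_eq_chk, he]
  rw [hA, Bool.eq_iff_iff, pvChk_iff]
  constructor
  · intro h
    exact (pvMachineB_iff m).mpr (fun k => by simpa [pvGood_none_eq_SI] using h k)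
  · intro h k
    rw [pvGood_none_eq_SI]
    exact (pvMachineB_iff m).mp h k

theorem pv_main (pi : List (List (Int × Int))) : is_valid_pi pi = is_valid_pi_alt pi := by
  induction pi with
  | nil => rfl
  | cons m ms ih =>
    simp only [is_valid_pi, is_valid_pi_alt, List.all_cons] at *
    rw [pvMachine_eq m, ih]
    cases (pvGroups m).values.all (fun vals =>
        !((vals.zip (PySem.List.slice vals (some 1) none)).any (fun p => p.1 ≥ p.2))) <;> simp

-- ===== VERDICT (by name: the statement is the Claim_ definition above) =====
theorem is_valid_pi_spec : Claim_equal_is_valid_pi := by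
  intro pi _
  exact pv_main pi
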